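-- pv_equiv track=rewrite | github.com/SachinPandey22/Hacker_Rank_Python_DSA | Unit 1/adv2.py | good_pairs
-- ===== SOURCE A (Python) =====
-- def good_pairs(pile1, pile2, k):
--     count = 0
--     mp = [k * pile for pile in pile2]
--     for p in range(len(pile1)):
--         for q in range(len(mp)):
--             if pile1[p] % mp[q] == 0:
--                 count += 1
--     return count
--
-- pile1 = [1, 2, 4, 12]
--
-- pile2 = [2, 4]
--
-- k = 3
-- ===== SOURCE B (Python) =====
-- def good_pairs(pile1, pile2, k):
--     cnt1 = {}
--     for x in pile1:
--         cnt1[x] = cnt1.get(x, 0) + 1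
--     cntm = {}
--     for q in pile2:
--         m = k * q
--         cntm[m] = cntm.get(m, 0) + 1
--     total = 0
--     for m, cm in cntm.items():
--         for x, cx in cnt1.items():
--             if x % m == 0:
--                 total += cm * cx
--     return total
-- ===== Notes on version B (the rewrite author's own statement) =====
-- stated objective: alternative
-- what changed: A's index-by-index nested scan over pile1 x pile2 is replaced by building value->count dictionaries for pile1 and for the multiplied pile k*pile2 and summing count products over distinct values (loop nesting also reversed), so work is proportional to distinct values rather than list lengths.
import Mathlib
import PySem

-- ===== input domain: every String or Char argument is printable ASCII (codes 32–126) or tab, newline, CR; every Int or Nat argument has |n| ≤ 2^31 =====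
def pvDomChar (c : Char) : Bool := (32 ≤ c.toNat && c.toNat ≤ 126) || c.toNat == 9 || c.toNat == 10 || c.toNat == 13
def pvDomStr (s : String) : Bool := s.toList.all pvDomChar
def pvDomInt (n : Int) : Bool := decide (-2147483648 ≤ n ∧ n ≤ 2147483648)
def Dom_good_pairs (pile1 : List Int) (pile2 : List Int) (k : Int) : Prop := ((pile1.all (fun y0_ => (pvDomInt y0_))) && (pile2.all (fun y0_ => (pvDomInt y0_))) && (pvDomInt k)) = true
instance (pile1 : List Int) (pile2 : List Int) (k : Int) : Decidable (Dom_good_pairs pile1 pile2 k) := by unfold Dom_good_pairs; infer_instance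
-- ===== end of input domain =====

-- B replaces A's index-by-index double scan with value→count dictionaries for pile1 and for k*pile2,
-- counting over distinct values weighted by multiplicities (objective: alternative algorithm).

-- ===== PORT A =====
def good_pairs (pile1 : List Int) (pile2 : List Int) (k : Int) : Int :=
  let mp := pile2.map (fun pile => k * pile)
  (PySem.List.pyRange 0 pile1.length 1).foldl (fun count p =>
    (PySem.List.pyRange 0 mp.length 1).foldl (fun count q =>
      if PySem.Int.mod (PySem.List.pyGetD pile1 p 0) (PySem.List.pyGetD mp q 0) == 0
      then count + 1 else count) count) 0

-- ===== PORT B =====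
def good_pairs_alt (pile1 : List Int) (pile2 : List Int) (k : Int) : Int :=
  let cnt1 := pile1.foldl (fun d x => d.insert x (d.getD x 0 + 1)) (PySem.Dict.empty : PySem.Dict Int Int)
  let cntm := pile2.foldl (fun d q => d.insert (k * q) (d.getD (k * q) 0 + 1)) (PySem.Dict.empty : PySem.Dict Int Int)
  cntm.items.foldl (fun total mc =>
    cnt1.items.foldl (fun total xc =>
      if PySem.Int.mod xc.1 mc.1 == 0 then total + mc.2 * xc.2 else total) total) 0

-- ===== PRECONDITION & SPEC =====
-- Pre_ excludes exactly the inputs where Python A raises ZeroDivisionError: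
-- some k*pile2[q] equals 0 while pile1 is nonempty (B raises there too).
def Pre_good_pairs (pile1 : List Int) (pile2 : List Int) (k : Int) : Prop :=
  pile1 = [] ∨ ∀ q ∈ pile2, k * q ≠ 0
instance (pile1 : List Int) (pile2 : List Int) (k : Int) : Decidable (Pre_good_pairs pile1 pile2 k) := by unfold Pre_good_pairs; infer_instance
def pvWitness_good_pairs : List Int × List Int × Int := ([1, 2, 4, 12], ([2, 4], 3))
def Spec_good_pairs (pile1 : List Int) (pile2 : List Int) (k : Int) (out : Int) : Prop := out = good_pairs_alt pile1 pile2 k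
instance (pile1 : List Int) (pile2 : List Int) (k : Int) (out : Int) : Decidable (Spec_good_pairs pile1 pile2 k out) := by unfold Spec_good_pairs; infer_instance

-- ===== CLAIM (what is proved, stated in full; the proofs are below) =====
def Claim_equal_good_pairs : Prop := ∀ (pile1 : List Int) (pile2 : List Int) (k : Int), Dom_good_pairs pile1 pile2 k → Pre_good_pairs pile1 pile2 k → Spec_good_pairs pile1 pile2 k (good_pairs pile1 pile2 k)

-- ===== LEMMAS AND PROOFS =====

-- the 0/1 divisibility indicator both programs count
def pvInd (x m : Int) : Int := if PySem.Int.mod x m == 0 then 1 else 0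

-- A's inner index loop over mp as a sum of indicators
theorem pvInner (mp : List Int) (x c : Int) :
    (PySem.List.pyRange 0 mp.length 1).foldl (fun count q =>
      if PySem.Int.mod x (PySem.List.pyGetD mp q 0) == 0
      then count + 1 else count) c = c + (mp.map (fun m => pvInd x m)).sum := by
  rw [PySem.List.foldl_pyRange_zero_pyGetD' mp 0 (fun count m => if PySem.Int.mod x m == 0 then count + 1 else count) c]
  have h : (fun (count m : Int) => if PySem.Int.mod x m == 0 then count + 1 else count)
      = fun count m => count + pvInd x m := by
    funext count m; simp [pvInd]; split <;> simp
  rw [h, PySem.List.foldl_add]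

-- A as a double sum of indicators
theorem pvA_eq (pile1 pile2 : List Int) (k : Int) :
    good_pairs pile1 pile2 k
      = (pile1.map (fun x => ((pile2.map (k * ·)).map (fun m => pvInd x m)).sum)).sum := by
  unfold good_pairs
  rw [PySem.List.foldl_pyRange_zero_pyGetD' pile1 0
    (fun count x => (PySem.List.pyRange 0 ((pile2.map (fun pile => k * pile)).length) 1).foldl (fun count q =>
      if PySem.Int.mod x (PySem.List.pyGetD (pile2.map (fun pile => k * pile)) q 0) == 0
      then count + 1 else count) count) 0]
  have h : (fun (count x : Int) => (PySem.List.pyRange 0 ((pile2.map (fun pile => k * pile)).length) 1).foldl (fun count q =>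
      if PySem.Int.mod x (PySem.List.pyGetD (pile2.map (fun pile => k * pile)) q 0) == 0
      then count + 1 else count) count)
      = fun count x => count + ((pile2.map (k * ·)).map (fun m => pvInd x m)).sum := by
    funext count x; rw [pvInner]
  rw [h, PySem.List.foldl_add]; simp

-- sum over the distinct values weighted by count = plain sum
theorem pvCountSum (l : List Int) (g : Int → Int) :
    ((PySem.Set.ofList l).map (fun y => (l.count y : Int) * g y)).sum = (l.map g).sum := by
  rw [← List.sum_toFinset _ (PySem.Set.nodup_ofList l)]
  have hfs : (PySem.Set.ofList l).toFinset = l.toFinset := by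
    ext y; simp [PySem.Set.mem_ofList]
  rw [hfs, Finset.sum_list_map_count]
  refine Finset.sum_congr rfl fun y _ => ?_
  simp

-- swap the two summations
theorem pvSwap (l1 l2 : List Int) (f : Int → Int → Int) :
    (l1.map (fun x => (l2.map (fun y => f x y)).sum)).sum
      = (l2.map (fun y => (l1.map (fun x => f x y)).sum)).sum := by
  induction l1 with
  | nil => simp
  | cons a t ih =>
      simp only [List.map_cons, List.sum_cons, ih]
      rw [← PySem.List.sum_map_add_int]

-- B as a weighted double sum of indicators
theorem pvB_eq (pile1 pile2 : List Int) (k : Int) :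
    good_pairs_alt pile1 pile2 k
      = ((PySem.Set.ofList (pile2.map (k * ·))).map (fun m =>
          ((pile2.map (k * ·)).count m : Int) *
            ((PySem.Set.ofList pile1).map (fun x => (pile1.count x : Int) * pvInd x m)).sum)).sum := by
  unfold good_pairs_alt
  have hm : pile2.foldl (fun d q => d.insert (k * q) (d.getD (k * q) 0 + 1)) (PySem.Dict.empty : PySem.Dict Int Int)
      = PySem.Dict.counter (pile2.map (k * ·)) := by
    rw [← PySem.Dict.foldl_insert_getD_add_one_eq_counter, List.foldl_map]
  simp only [hm, PySem.Dict.foldl_insert_getD_add_one_eq_counter, PySem.Dict.items_counter]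
  have hinner : ∀ (m cm t : Int),
      ((PySem.Set.ofList pile1).map (fun x => (x, (pile1.count x : Int)))).foldl
        (fun total xc => if PySem.Int.mod xc.1 m == 0 then total + cm * xc.2 else total) t
      = t + cm * ((PySem.Set.ofList pile1).map (fun x => (pile1.count x : Int) * pvInd x m)).sum := by
    intro m cm t
    have h1 : (fun (total : Int) (xc : Int × Int) => if PySem.Int.mod xc.1 m == 0 then total + cm * xc.2 else total)
        = fun total xc => total + cm * (xc.2 * pvInd xc.1 m) := by
      funext total xc; simp [pvInd]; split <;> simp
    rw [h1, PySem.List.foldl_add, List.map_map]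
    rw [show ((fun xc : Int × Int => cm * (xc.2 * pvInd xc.1 m)) ∘ (fun x => (x, (pile1.count x : Int))))
        = fun x => cm * ((pile1.count x : Int) * pvInd x m) from rfl]
    rw [List.sum_map_mul_left]
  have h2 : (fun (total : Int) (mc : Int × Int) =>
      ((PySem.Set.ofList pile1).map (fun x => (x, (pile1.count x : Int)))).foldl
        (fun total xc => if PySem.Int.mod xc.1 mc.1 == 0 then total + mc.2 * xc.2 else total) total)
      = fun total mc => total + mc.2 * ((PySem.Set.ofList pile1).map (fun x => (pile1.count x : Int) * pvInd x mc.1)).sum := by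
    funext total mc; exact hinner mc.1 mc.2 total
  rw [h2, PySem.List.foldl_add, List.map_map]
  simp only [zero_add]; rfl

-- ===== VERDICT (by name: the statement is the Claim_ definition above) =====
theorem good_pairs_spec : Claim_equal_good_pairs := by
  intro pile1 pile2 k _ _
  unfold Spec_good_pairs
  rw [pvA_eq, pvB_eq]
  symm
  calc ((PySem.Set.ofList (pile2.map (k * ·))).map (fun m =>
          ((pile2.map (k * ·)).count m : Int) *
            ((PySem.Set.ofList pile1).map (fun x => (pile1.count x : Int) * pvInd x m)).sum)).sum
      = ((pile2.map (k * ·)).map (fun m =>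
            ((PySem.Set.ofList pile1).map (fun x => (pile1.count x : Int) * pvInd x m)).sum)).sum :=
        pvCountSum _ _
    _ = ((pile2.map (k * ·)).map (fun m => (pile1.map (fun x => pvInd x m)).sum)).sum := by
        refine congrArg List.sum (List.map_congr_left fun m _ => ?_)
        exact pvCountSum pile1 (fun x => pvInd x m)
    _ = (pile1.map (fun x => ((pile2.map (k * ·)).map (fun m => pvInd x m)).sum)).sum :=
        (pvSwap pile1 (pile2.map (k * ·)) pvInd).symm
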